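-- pv_equiv track=rewrite | github.com/dustin-kang/python-pratice | 알고리즘/dfs_bfs/dfs_203.py | dfs
-- ===== SOURCE A (Python) =====
-- def dfs(numbers, depth, answer, history):
--     if depth == len(numbers):
--         answer.append(history[:])
--         return
--
--     if not history:
--         for n in numbers[depth]:
--             new_history = history[:]
--             new_history.append(n)
--             dfs(numbers, depth + 1, answer, new_history)
--     else:
--         for n in numbers[depth]:
--             if history[-1] % 2 == 0 and n % 2 != 0:
--                 new_history = history[:]
--                 new_history.append(n)
--                 dfs(numbers, depth + 1, answer, new_history)
--
--             if history[-1] % 2 != 0 and n % 2 == 0: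
--                 new_history = history[:]
--                 new_history.append(n)
--                 dfs(numbers, depth + 1, answer, new_history)
--
--     return answer
-- ===== SOURCE B (Python) =====
-- def dfs(numbers, depth, answer, history):
--     # Iterative level-by-level build instead of recursion.
--     # Like A, this mutates `answer` in place (extend) and returns it
--     # (A returns None in the depth == len(numbers) case, which Pre_ excludes).
--     if depth == len(numbers):
--         answer.append(history[:])
--         return
--     frontier = [list(history)]
--     for d in range(depth, len(numbers)):
--         group = numbers[d]
--         frontier = [p + [n] for p in frontier for n in group
--                     if not p or p[-1] % 2 != n % 2]
--     answer.extend(frontier)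
--     return answer
-- ===== Notes on version B (the rewrite author's own statement) =====
-- stated objective: alternative
-- what changed: Replaced the branching recursion with an iterative level-by-level frontier build: one loop over depths extends every partial sequence with each valid number, so the recursion (and its two mutually exclusive parity branches) disappears.
-- outside the precondition, e.g. on dfs([[1]], 1, [], []): A returns None, B returns None; on dfs([[1]], 2, [], []): A raises IndexError, B returns [[]]
import Mathlib
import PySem

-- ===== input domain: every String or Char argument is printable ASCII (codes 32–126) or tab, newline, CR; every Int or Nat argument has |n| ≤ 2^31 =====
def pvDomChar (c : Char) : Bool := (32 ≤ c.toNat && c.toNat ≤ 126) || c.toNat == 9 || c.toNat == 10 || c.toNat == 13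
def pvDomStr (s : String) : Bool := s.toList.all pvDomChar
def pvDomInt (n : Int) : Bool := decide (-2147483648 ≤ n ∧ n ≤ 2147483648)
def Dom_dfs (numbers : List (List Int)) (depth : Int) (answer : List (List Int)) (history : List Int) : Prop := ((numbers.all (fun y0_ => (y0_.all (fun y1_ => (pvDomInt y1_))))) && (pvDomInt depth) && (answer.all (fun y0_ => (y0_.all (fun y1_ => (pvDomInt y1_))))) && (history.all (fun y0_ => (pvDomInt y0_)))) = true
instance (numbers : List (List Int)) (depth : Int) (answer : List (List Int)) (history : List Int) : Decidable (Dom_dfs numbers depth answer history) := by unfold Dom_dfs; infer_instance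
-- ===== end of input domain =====

-- B replaces the branching recursion with an iterative level-by-level frontier build
-- (alternative decomposition, same cost). Both versions mutate `answer` in place in
-- Python; the equivalence proved here is about the RETURN value.

-- ===== PORT A =====
-- Literal port of A's recursion; `fuel` only makes the recursion structural
-- (it starts at (len - depth).toNat + 1 and each call consumes one level, so it
-- never runs out on any input the recursion actually reaches).
def dfsAux : Nat → List (List Int) → Int → List (List Int) → List Int → List (List Int)
  | 0, _, _, answer, _ => answer
  | fuel+1, numbers, depth, answer, history =>
    if depth = (numbers.length : Int) then answer ++ [history]
    else
      match PySem.List.pyGet? numbers depth with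
      | none => answer   -- numbers[depth] raises IndexError; outside Pre_
      | some group =>
        if history = [] then
          group.foldl (fun acc n => dfsAux fuel numbers (depth + 1) acc (history ++ [n])) answer
        else
          group.foldl (fun acc n =>
            -- history ≠ [] in this branch, so this is history[-1]
            let last := (PySem.List.pyGet? history (-1)).getD 0
            let acc1 := if PySem.Int.mod last 2 = 0 ∧ PySem.Int.mod n 2 ≠ 0
              then dfsAux fuel numbers (depth + 1) acc (history ++ [n]) else acc
            if PySem.Int.mod last 2 ≠ 0 ∧ PySem.Int.mod n 2 = 0
              then dfsAux fuel numbers (depth + 1) acc1 (history ++ [n]) else acc1) answer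

def dfs (numbers : List (List Int)) (depth : Int) (answer : List (List Int)) (history : List Int) : List (List Int) :=
  dfsAux (((numbers.length : Int) - depth).toNat + 1) numbers depth answer history

-- ===== PORT B =====
-- valid(p, n): 'not p or p[-1] % 2 != n % 2'
def okB (p : List Int) (n : Int) : Bool :=
  p.isEmpty || (PySem.Int.mod ((PySem.List.pyGet? p (-1)).getD 0) 2 != PySem.Int.mod n 2)

-- one level of the comprehension: [p + [n] for p in front for n in group if valid]
def extendLevel (group : List Int) (front : List (List Int)) : List (List Int) :=
  front.flatMap (fun p => group.filterMap (fun n => if okB p n then some (p ++ [n]) else none))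

def dfs_alt (numbers : List (List Int)) (depth : Int) (answer : List (List Int)) (history : List Int) : List (List Int) :=
  if depth = (numbers.length : Int) then answer ++ [history]
  else
    let frontier := (PySem.List.pyRange depth (numbers.length : Int) 1).foldl
      (fun front d => extendLevel ((PySem.List.pyGet? numbers d).getD []) front) [history]
    answer ++ frontier

-- ===== PRECONDITION & SPEC =====
-- Pre_ excludes depth == len(numbers), where A returns None (not a list), and
-- depth out of Python's index range, where numbers[depth] raises IndexError.
def Pre_dfs (numbers : List (List Int)) (depth : Int) (answer : List (List Int)) (history : List Int) : Prop :=
  -(numbers.length : Int) ≤ depth ∧ depth < (numbers.length : Int)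
instance (numbers : List (List Int)) (depth : Int) (answer : List (List Int)) (history : List Int) : Decidable (Pre_dfs numbers depth answer history) := by unfold Pre_dfs; infer_instance
def pvWitness_dfs : List (List Int) × Int × List (List Int) × List Int := ([[2], [1, 3]], 0, [], [])

def Spec_dfs (numbers : List (List Int)) (depth : Int) (answer : List (List Int)) (history : List Int) (out : List (List Int)) : Prop := out = dfs_alt numbers depth answer history
instance (numbers : List (List Int)) (depth : Int) (answer : List (List Int)) (history : List Int) (out : List (List Int)) : Decidable (Spec_dfs numbers depth answer history out) := by unfold Spec_dfs; infer_instance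

-- ===== CLAIM (what is proved, stated in full; the proofs are below) =====
def Claim_equal_dfs : Prop := ∀ (numbers : List (List Int)) (depth : Int) (answer : List (List Int)) (history : List Int), Dom_dfs numbers depth answer history → Pre_dfs numbers depth answer history → Spec_dfs numbers depth answer history (dfs numbers depth answer history)

-- ===== LEMMAS AND PROOFS =====

lemma extendLevel_append (group : List Int) (xs ys : List (List Int)) :
    extendLevel group (xs ++ ys) = extendLevel group xs ++ extendLevel group ys := by
  simp [extendLevel]

lemma build_append (numbers : List (List Int)) (ds : List Int) :
    ∀ (xs ys : List (List Int)),
      ds.foldl (fun front d => extendLevel ((PySem.List.pyGet? numbers d).getD []) front) (xs ++ ys)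
      = ds.foldl (fun front d => extendLevel ((PySem.List.pyGet? numbers d).getD []) front) xs
        ++ ds.foldl (fun front d => extendLevel ((PySem.List.pyGet? numbers d).getD []) front) ys := by
  induction ds with
  | nil => intro xs ys; rfl
  | cons d rest ih =>
      intro xs ys
      simp only [List.foldl_cons, extendLevel_append]
      exact ih _ _

lemma build_nil (numbers : List (List Int)) (ds : List Int) :
    ds.foldl (fun front d => extendLevel ((PySem.List.pyGet? numbers d).getD []) front) [] = [] := by
  induction ds with
  | nil => rfl
  | cons d rest ih =>
      simp only [List.foldl_cons, extendLevel, List.flatMap_nil]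
      exact ih

lemma build_flatMap (numbers : List (List Int)) (ds : List Int) (l : List Int)
    (h : Int → List (List Int)) :
    ds.foldl (fun front d => extendLevel ((PySem.List.pyGet? numbers d).getD []) front) (l.flatMap h)
    = l.flatMap (fun n => ds.foldl (fun front d => extendLevel ((PySem.List.pyGet? numbers d).getD []) front) (h n)) := by
  induction l with
  | nil => simpa using build_nil numbers ds
  | cons n rest ih =>
      simp only [List.flatMap_cons]
      rw [build_append]
      rw [ih]

lemma ite_ite_append {α : Type} (c1 c2 : Prop) [Decidable c1] [Decidable c2]
    (h : ¬ (c1 ∧ c2)) (acc b : List α) :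
    (if c2 then (if c1 then acc ++ b else acc) ++ b else (if c1 then acc ++ b else acc))
      = if c1 ∨ c2 then acc ++ b else acc := by
  by_cases h1 : c1 <;> by_cases h2 : c2 <;> simp [h1, h2] <;> tauto

-- the key invariant: A's recursion equals B's frontier fold
lemma dfsAux_eq (fuel : Nat) : ∀ (numbers : List (List Int)) (depth : Int)
    (answer : List (List Int)) (history : List Int),
    -(numbers.length : Int) ≤ depth → depth ≤ (numbers.length : Int) →
    (((numbers.length : Int) - depth).toNat < fuel) →
    dfsAux fuel numbers depth answer history
      = answer ++ (PySem.List.pyRange depth (numbers.length : Int) 1).foldl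
          (fun front d => extendLevel ((PySem.List.pyGet? numbers d).getD []) front) [history] := by
  induction fuel with
  | zero => intro _ _ _ _ _ _ h; omega
  | succ fuel ih =>
    intro numbers depth answer history hlo hhi hfuel
    by_cases hd : depth = (numbers.length : Int)
    · subst hd
      rw [PySem.List.pyRange_one_eq_nil (by omega)]
      simp [dfsAux]
    · have hlt : depth < (numbers.length : Int) := lt_of_le_of_ne hhi hd
      obtain ⟨group, hg⟩ : ∃ g, PySem.List.pyGet? numbers depth = some g := by
        cases h : PySem.List.pyGet? numbers depth with
        | none =>
            exfalso
            exact (PySem.List.pyGet?_eq_none_iff numbers depth).mp h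
              (by constructor <;> omega)
        | some g => exact ⟨g, rfl⟩
      rw [PySem.List.pyRange_one_cons hlt]
      simp only [List.foldl_cons]
      -- the first level applied to the singleton frontier
      have hstep : extendLevel ((PySem.List.pyGet? numbers depth).getD []) [history]
          = group.filterMap (fun n => if okB history n then some (history ++ [n]) else none) := by
        simp [extendLevel, hg]
      rw [hstep]
      -- IH specialised to depth + 1
      have IH1 : ∀ (acc : List (List Int)) (h' : List Int),
          dfsAux fuel numbers (depth + 1) acc h'
          = acc ++ (PySem.List.pyRange (depth + 1) (numbers.length : Int) 1).foldl
              (fun front d => extendLevel ((PySem.List.pyGet? numbers d).getD []) front) [h'] := by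
        intro acc h'
        exact ih numbers (depth + 1) acc h' (by omega) (by omega) (by omega)
      -- abbreviation for the rest of the build
      set B1 : List Int → List (List Int) := fun h' =>
        (PySem.List.pyRange (depth + 1) (numbers.length : Int) 1).foldl
          (fun front d => extendLevel ((PySem.List.pyGet? numbers d).getD []) front) [h'] with hB1
      -- the right-hand side distributes over the filterMap
      have hrhs : (PySem.List.pyRange (depth + 1) (numbers.length : Int) 1).foldl
            (fun front d => extendLevel ((PySem.List.pyGet? numbers d).getD []) front)
            (group.filterMap (fun n => if okB history n then some (history ++ [n]) else none))
          = group.flatMap (fun n => if okB history n then B1 (history ++ [n]) else []) := by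
        rw [List.filterMap_eq_flatMap_toList]
        rw [build_flatMap]
        apply List.flatMap_congr
        intro n _
        by_cases hok : okB history n
        · simp [hok, hB1]
        · simp [hok, build_nil]
      -- both A-loop bodies equal the uniform conditional body
      have hbodyfold :
          (if history = [] then
            group.foldl (fun acc n => dfsAux fuel numbers (depth + 1) acc (history ++ [n])) answer
          else
            group.foldl (fun acc n =>
              let last := (PySem.List.pyGet? history (-1)).getD 0
              let acc1 := if PySem.Int.mod last 2 = 0 ∧ PySem.Int.mod n 2 ≠ 0
                then dfsAux fuel numbers (depth + 1) acc (history ++ [n]) else acc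
              if PySem.Int.mod last 2 ≠ 0 ∧ PySem.Int.mod n 2 = 0
                then dfsAux fuel numbers (depth + 1) acc1 (history ++ [n]) else acc1) answer)
          = group.foldl (fun acc n => acc ++ (if okB history n then B1 (history ++ [n]) else [])) answer := by
        by_cases hh : history = []
        · simp only [hh, if_pos]
          apply PySem.List.foldl_congr_mem
          intro acc n _
          rw [IH1]
          simp [okB, hB1]
        · simp only [if_neg hh]
          apply PySem.List.foldl_congr_mem
          intro acc n _
          have hemp : history.isEmpty = false := by simp [hh]
          simp only [IH1]
          rw [ite_ite_append _ _ (fun hc => hc.2.1 hc.1.1) acc _]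
          have hiff : (PySem.Int.mod ((PySem.List.pyGet? history (-1)).getD 0) 2 = 0 ∧ PySem.Int.mod n 2 ≠ 0
              ∨ PySem.Int.mod ((PySem.List.pyGet? history (-1)).getD 0) 2 ≠ 0 ∧ PySem.Int.mod n 2 = 0)
              ↔ okB history n = true := by
            have hm1 := PySem.Int.mod_eq_emod_of_pos (a := (PySem.List.pyGet? history (-1)).getD 0)
              (b := 2) (by norm_num)
            have hm2 := PySem.Int.mod_eq_emod_of_pos (a := n) (b := 2) (by norm_num)
            simp only [okB, hemp, hm1, hm2, Bool.false_or, bne_iff_ne, ne_eq]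
            omega
          by_cases hok : okB history n = true
          · rw [if_pos (hiff.mpr hok), if_pos hok, hB1]
          · rw [if_neg (fun hc => hok (hiff.mp hc)), if_neg hok, List.append_nil]
      conv_lhs => rw [dfsAux]
      simp only [if_neg hd, hg]
      rw [hbodyfold, PySem.List.foldl_append_eq_flatMap, hrhs]

-- ===== VERDICT (by name: the statement is the Claim_ definition above) =====
theorem dfs_spec : Claim_equal_dfs := by
  intro numbers depth answer history _ hpre
  unfold Spec_dfs dfs dfs_alt
  obtain ⟨hlo, hhi⟩ := hpre
  rw [if_neg (by omega)]
  exact dfsAux_eq _ numbers depth answer history hlo (le_of_lt hhi) (by omega)
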